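-- pv_equiv track=rewrite | github.com/WarrenWu4/aoc | 2025/day03/3a.py | find_max_joltage
-- ===== SOURCE A (Python) =====
-- def find_max_joltage(seq):
--   first_max, total_max = -1, 0
--   for i in range(len(seq)-1):
--     if (first_max > seq[i]):
--       continue
--     else:
--       first_max = seq[i]
--     second_max = -1
--     for j in range(i+1, len(seq)):
--       if (second_max > seq[j]):
--         continue
--       else:
--         second_max = seq[j]
--     total_max = max(total_max, first_max * 10 + second_max)
--   return total_max
-- ===== SOURCE B (Python) =====
-- def find_max_joltage(seq):
--     # sufs[i] = max of seq[i+1:], floored at -1 (one backward pass)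
--     sufs = []
--     m = -1
--     for x in reversed(seq):
--         sufs.append(m)
--         m = max(m, x)
--     sufs.reverse()
--     # one forward pass: candidates only at running-maximum positions
--     best, pre = 0, -1
--     for x, s in zip(seq[:-1], sufs):
--         if x >= pre:
--             pre = x
--             best = max(best, 10 * x + s)
--     return best
-- ===== Notes on version B (the rewrite author's own statement) =====
-- stated objective: faster
-- what changed: Replaced the O(n^2) nested scan (re-scanning the whole suffix for each new prefix maximum) with one backward pass precomputing suffix maxima and one forward pass over the zipped list tracking the running prefix maximum.
import Mathlib
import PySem

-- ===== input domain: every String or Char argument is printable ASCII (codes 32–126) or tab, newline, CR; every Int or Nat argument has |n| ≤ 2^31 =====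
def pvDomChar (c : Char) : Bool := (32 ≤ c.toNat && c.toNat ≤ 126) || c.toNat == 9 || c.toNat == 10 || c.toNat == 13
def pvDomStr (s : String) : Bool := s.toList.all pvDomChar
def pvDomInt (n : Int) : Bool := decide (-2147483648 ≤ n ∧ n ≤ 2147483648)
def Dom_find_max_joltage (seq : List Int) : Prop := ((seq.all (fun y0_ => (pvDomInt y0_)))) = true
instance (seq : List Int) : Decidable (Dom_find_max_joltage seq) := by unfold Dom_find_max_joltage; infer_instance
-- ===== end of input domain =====

-- B replaces A's O(n^2) nested suffix re-scan with a backward suffix-max pass plus one forward pass (faster, measured).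


-- ===== PORT A =====
def find_max_joltage (seq : List Int) : Int :=
  ((PySem.List.pyRange 0 ((seq.length : Int) - 1) 1).foldl
    (fun (st : Int × Int) i =>
      -- st = (first_max, total_max)
      if st.1 > PySem.List.pyGetD seq i 0 then st
      else
        let fm := PySem.List.pyGetD seq i 0
        let sm := (PySem.List.pyRange (i + 1) (seq.length : Int) 1).foldl
          (fun sm j => if sm > PySem.List.pyGetD seq j 0 then sm else PySem.List.pyGetD seq j 0) (-1)
        (fm, max st.2 (fm * 10 + sm)))
    (-1, 0)).2

-- ===== PORT B =====
def find_max_joltage_alt (seq : List Int) : Int :=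
  -- backward pass: sufs[i] = max of seq[i+1:], floored at -1
  let p := seq.reverse.foldl (fun (p : List Int × Int) x => (p.1 ++ [p.2], max p.2 x)) ([], -1)
  let sufs := p.1.reverse
  -- forward pass over zip(seq[:-1], sufs), state (best, pre)
  (((PySem.List.slice seq none (some (-1))).zip sufs).foldl
    (fun (st : Int × Int) xs =>
      if xs.1 ≥ st.2 then (max st.1 (10 * xs.1 + xs.2), xs.1) else st)
    (0, -1)).1

-- ===== PRECONDITION & SPEC =====
def Spec_find_max_joltage (seq : List Int) (out : Int) : Prop := out = find_max_joltage_alt seq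
instance (seq : List Int) (out : Int) : Decidable (Spec_find_max_joltage seq out) := by unfold Spec_find_max_joltage; infer_instance

-- ===== CLAIM (what is proved, stated in full; the proofs are below) =====
def Claim_equal_find_max_joltage : Prop := ∀ (seq : List Int), Dom_find_max_joltage seq → Spec_find_max_joltage seq (find_max_joltage seq)

-- ===== LEMMAS AND PROOFS =====

-- clamped maximum of a list, floor -1 (the value both programs' running maxima compute)
def cmax (xs : List Int) : Int := xs.foldl max (-1)

theorem foldl_max_shift (l : List Int) : ∀ (a x : Int), l.foldl max (max a x) = max x (l.foldl max a) := by
  induction l with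
  | nil => intro a x; simp [List.foldl, max_comm]
  | cons y t ih =>
      intro a x
      simp only [List.foldl]
      rw [show max (max a x) y = max (max a y) x by omega, ih]

theorem cmax_cons (x : Int) (xs : List Int) : cmax (x :: xs) = max x (cmax xs) := by
  simp only [cmax, List.foldl]
  exact foldl_max_shift xs (-1) x

-- A's inner loop is cmax of the suffix
theorem innerA_eq (seq : List Int) (i : Int) (hi : 0 ≤ i) :
    (PySem.List.pyRange (i + 1) (seq.length : Int) 1).foldl
      (fun sm j => if sm > PySem.List.pyGetD seq j 0 then sm else PySem.List.pyGetD seq j 0) (-1)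
      = cmax (seq.drop (i + 1).toNat) := by
  have h1 : (PySem.List.pyRange (i + 1) (seq.length : Int) 1).foldl
      (fun sm j => if sm > PySem.List.pyGetD seq j 0 then sm else PySem.List.pyGetD seq j 0) (-1)
      = (PySem.List.pyRange (i + 1) (seq.length : Int) 1).foldl
      (fun sm j => max sm (PySem.List.pyGetD seq j 0)) (-1) := by
    apply PySem.List.foldl_congr_mem
    intro acc x _
    by_cases h : acc > PySem.List.pyGetD seq x 0
    · rw [if_pos h]; omega
    · rw [if_neg h]; omega
  rw [h1, PySem.List.foldl_pyRange_pyGetD' seq 0 (fun sm v => max sm v) (-1) (by omega)]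
  rfl

-- B's backward pass computes the suffix cmax table
theorem sufsB_eq (seq : List Int) :
    ((seq.reverse.foldl (fun (p : List Int × Int) x => (p.1 ++ [p.2], max p.2 x)) ([], -1)).1.reverse,
     (seq.reverse.foldl (fun (p : List Int × Int) x => (p.1 ++ [p.2], max p.2 x)) ([], -1)).2)
      = ((List.range seq.length).map (fun k => cmax (seq.drop (k + 1))), cmax seq) := by
  rw [List.foldl_reverse]
  induction seq with
  | nil => simp [cmax]
  | cons x xs ih =>
      simp only [List.foldr] at *
      obtain ⟨ih1, ih2⟩ := Prod.mk.injEq .. ▸ ih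
      simp only [List.reverse_append, List.reverse_singleton, List.singleton_append] at *
      rw [ih1, ih2, cmax_cons, max_comm]
      simp [List.range_succ_eq_map, List.map_map, Function.comp_def]

-- generic swapped-state fold correspondence
theorem swapFold {α : Type} (l : List α) (f g : Int × Int → α → Int × Int)
    (h : ∀ p x, x ∈ l → f p x = ((g (p.2, p.1) x).2, (g (p.2, p.1) x).1)) :
    ∀ (a b : Int), l.foldl f (a, b) = ((l.foldl g (b, a)).2, (l.foldl g (b, a)).1) := by
  induction l with
  | nil => intro a b; rfl
  | cons x t ih =>
      intro a b
      simp only [List.foldl]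
      rw [h (a, b) x (by simp)]
      exact ih (fun p y hy => h p y (by simp [hy])) _ _

-- the zipped list B folds over, as a map over range
theorem zipB_eq (seq : List Int) :
    (seq.dropLast.zip ((List.range seq.length).map (fun k => cmax (seq.drop (k + 1)))))
      = (List.range (seq.length - 1)).map (fun k => (seq.getD k 0, cmax (seq.drop (k + 1)))) := by
  apply List.ext_getElem
  · simp [List.length_zip, List.length_dropLast]
  · intro k h1 h2
    have hk : k < seq.length - 1 := by
      simp [List.length_zip, List.length_dropLast] at h1; omega
    simp only [List.getElem_zip, List.getElem_dropLast, List.getElem_map, List.getElem_range,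
      List.getD_eq_getElem?_getD, List.getElem?_eq_getElem (by omega : k < seq.length),
      Option.getD_some]

theorem find_max_joltage_eq (seq : List Int) : find_max_joltage seq = find_max_joltage_alt seq := by
  have hA : find_max_joltage seq =
      ((List.range (seq.length - 1)).foldl
        (fun (st : Int × Int) k =>
          if st.1 > seq.getD k 0 then st
          else (seq.getD k 0, max st.2 (seq.getD k 0 * 10 + cmax (seq.drop (k + 1))))) (-1, 0)).2 := by
    unfold find_max_joltage
    rw [PySem.List.pyRange_one, List.foldl_map]
    congr 1
    have hlen : (((seq.length : Int) - 1) - 0).toNat = seq.length - 1 := by omega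
    rw [hlen]
    apply PySem.List.foldl_congr_mem
    intro acc k _
    have h0 : (0 : Int) + (k : Int) = (k : Int) := by ring
    have h1 : ((k : Int) + 1).toNat = k + 1 := by omega
    simp only [h0, innerA_eq seq (k : Int) (by positivity), h1, PySem.List.pyGetD_natCast]
  have hB : find_max_joltage_alt seq =
      ((List.range (seq.length - 1)).foldl
        (fun (st : Int × Int) k =>
          if seq.getD k 0 ≥ st.2 then (max st.1 (10 * seq.getD k 0 + cmax (seq.drop (k + 1))), seq.getD k 0)
          else st) (0, -1)).1 := by
    unfold find_max_joltage_alt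
    have hs := congrArg Prod.fst (sufsB_eq seq)
    simp only at hs
    simp only [PySem.List.slice_to_neg_one, hs, zipB_eq seq, List.foldl_map]
  rw [hA, hB]
  rw [swapFold (List.range (seq.length - 1))
        (fun (st : Int × Int) k =>
          if st.1 > seq.getD k 0 then st
          else (seq.getD k 0, max st.2 (seq.getD k 0 * 10 + cmax (seq.drop (k + 1)))))
        (fun (st : Int × Int) k =>
          if seq.getD k 0 ≥ st.2 then (max st.1 (10 * seq.getD k 0 + cmax (seq.drop (k + 1))), seq.getD k 0)
          else st)
        ?_ (-1) 0]
  intro p k _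
  dsimp only
  by_cases h : p.1 > seq.getD k 0
  · rw [if_pos h, if_neg (by omega)]
  · rw [if_neg h, if_pos (by omega)]
    simp [Int.mul_comm]

-- ===== VERDICT (by name: the statement is the Claim_ definition above) =====
theorem find_max_joltage_spec : Claim_equal_find_max_joltage := by
  intro seq _
  exact find_max_joltage_eq seq
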